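-- pv_equiv track=rewrite | github.com/jason-zhj/ml_toolkit | hash_toolkit/metrics/utils.py | _compute_hash_with_dist
-- ===== SOURCE A (Python) =====
-- import itertools
--
-- def _compute_hash_with_dist(hashcode, dist):
--     "`hashcode` should only contain '0' and '1', return a list of hash strings, whose hamming distance to `hashcode` is `dist`"
--     hash_ls = []
--     invert = lambda x:"1" if x=="0" else "0"
--     code_length = len(hashcode)
--     for positions in itertools.combinations(range(code_length),dist):
--         # invert the hash bit at `positions`
--         computed_code = "".join([invert(hashcode[i]) if i in positions else hashcode[i]
--                                  for i in range(code_length)])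
--         hash_ls.append(computed_code)
--
--     return hash_ls
-- ===== SOURCE B (Python) =====
-- def _compute_hash_with_dist(hashcode, dist):
--     "`hashcode` should only contain '0' and '1', return a list of hash strings, whose hamming distance to `hashcode` is `dist`"
--     n = len(hashcode)
--
--     def invert(x):
--         return "1" if x == "0" else "0"
--
--     def go(i, k):
--         # prune: impossible to place k flips in the remaining n-i positions
--         if k < 0 or k > n - i:
--             return []
--         if i == n:
--             return [""]
--         out = []
--         if k > 0:
--             out += [invert(hashcode[i]) + s for s in go(i + 1, k - 1)]
--         out += [hashcode[i] + s for s in go(i + 1, k)]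
--         return out
--
--     return go(0, dist)
-- ===== Notes on version B (the rewrite author's own statement) =====
-- stated objective: alternative
-- what changed: Replaces the itertools.combinations loop (choose flip positions, then rebuild the whole string with a per-index membership test) by a recursive flip-before-keep enumeration over bit positions with pruning, building each output string once.
import Mathlib
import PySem

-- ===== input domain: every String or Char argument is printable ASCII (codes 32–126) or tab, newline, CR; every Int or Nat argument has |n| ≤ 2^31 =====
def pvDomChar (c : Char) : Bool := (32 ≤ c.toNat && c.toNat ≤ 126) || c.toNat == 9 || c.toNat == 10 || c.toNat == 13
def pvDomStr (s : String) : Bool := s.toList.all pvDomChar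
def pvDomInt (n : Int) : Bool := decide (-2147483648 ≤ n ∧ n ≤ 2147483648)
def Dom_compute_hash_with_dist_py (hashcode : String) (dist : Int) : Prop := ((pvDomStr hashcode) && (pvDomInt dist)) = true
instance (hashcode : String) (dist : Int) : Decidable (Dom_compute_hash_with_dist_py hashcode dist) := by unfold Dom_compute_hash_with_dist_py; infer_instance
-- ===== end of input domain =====

-- B replaces the itertools.combinations loop (choose positions, then rebuild the whole string per
-- combination) by a recursive flip-before-keep enumeration over bit positions with pruning (alternative decomposition).

-- ===== PORT A =====
-- invert lambda of A
def pvInvertA (c : Char) : Char := if c = '0' then '1' else '0'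

-- itertools.combinations(xs, k) in lexicographic order (the library call, ported as its standard recursion)
def pvCombos : List Nat → Nat → List (List Nat)
  | _, 0 => [[]]
  | [], _ + 1 => []
  | x :: xs, k + 1 => (pvCombos xs k).map (fun c => x :: c) ++ pvCombos xs (k + 1)

-- the per-combination rebuild: "".join([invert(hashcode[i]) if i in positions else hashcode[i] for i in range(code_length)])
def pvBuild (l : List Char) (positions : List Nat) : List Char :=
  (List.range l.length).map (fun i => if i ∈ positions then pvInvertA (l.getD i ' ') else l.getD i ' ')

def compute_hash_with_dist_py (hashcode : String) (dist : Int) : List String :=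
  -- itertools.combinations raises ValueError for dist < 0; that case is excluded by Pre_ below
  if dist < 0 then []
  else (pvCombos (List.range hashcode.toList.length) dist.toNat).map (fun ps => String.ofList (pvBuild hashcode.toList ps))

-- ===== PORT B =====
def pvInvertB (c : Char) : Char := if c = '0' then '1' else '0'

-- go(i, k) of Source B, over the remaining suffix of the code
def pvGo (cs : List Char) (k : Int) : List (List Char) :=
  if k < 0 ∨ (cs.length : Int) < k then []
  else
    match cs with
    | [] => [[]]
    | c :: cs' =>
      (if 0 < k then (pvGo cs' (k - 1)).map (fun s => pvInvertB c :: s) else [])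
        ++ (pvGo cs' k).map (fun s => c :: s)

def compute_hash_with_dist_py_alt (hashcode : String) (dist : Int) : List String :=
  (pvGo hashcode.toList dist).map String.ofList

-- ===== PRECONDITION & SPEC =====
-- Pre_ excludes dist < 0, where itertools.combinations (hence A) raises ValueError.
def Pre_compute_hash_with_dist_py (hashcode : String) (dist : Int) : Prop := 0 ≤ dist
instance (hashcode : String) (dist : Int) : Decidable (Pre_compute_hash_with_dist_py hashcode dist) := by unfold Pre_compute_hash_with_dist_py; infer_instance
def pvWitness_compute_hash_with_dist_py : String × Int := ("0101", 2)

def Spec_compute_hash_with_dist_py (hashcode : String) (dist : Int) (out : List String) : Prop := out = compute_hash_with_dist_py_alt hashcode dist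
instance (hashcode : String) (dist : Int) (out : List String) : Decidable (Spec_compute_hash_with_dist_py hashcode dist out) := by unfold Spec_compute_hash_with_dist_py; infer_instance

-- ===== CLAIM (what is proved, stated in full; the proofs are below) =====
def Claim_equal_compute_hash_with_dist_py : Prop := ∀ (hashcode : String) (dist : Int), Dom_compute_hash_with_dist_py hashcode dist → Pre_compute_hash_with_dist_py hashcode dist → Spec_compute_hash_with_dist_py hashcode dist (compute_hash_with_dist_py hashcode dist)

-- ===== LEMMAS AND PROOFS =====

-- too few elements left: no combinations
lemma pvCombos_eq_nil (xs : List Nat) (k : Nat) (h : xs.length < k) : pvCombos xs k = [] := by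
  induction xs generalizing k with
  | nil => cases k with
    | zero => omega
    | succ j => rfl
  | cons x xs ih =>
    cases k with
    | zero => omega
    | succ j =>
      simp only [pvCombos]
      rw [ih j (by simpa using h), ih (j+1) (by simp at h; omega)]
      simp

-- combinations commute with relabelling the ground list
lemma pvCombos_map (f : Nat → Nat) (xs : List Nat) (k : Nat) :
    pvCombos (xs.map f) k = (pvCombos xs k).map (List.map f) := by
  induction xs generalizing k with
  | nil => cases k <;> rfl
  | cons x xs ih =>
    cases k with
    | zero => rfl
    | succ j =>
      simp only [List.map_cons, pvCombos, ih, List.map_append, List.map_map]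
      rfl

lemma pvBuild_nil (l : List Char) : pvBuild l [] = l := by
  simp only [pvBuild, List.not_mem_nil]
  apply List.ext_getElem (by simp)
  intro i h1 h2
  simp [List.getD_eq_getElem?_getD, h2]

lemma pvBuild_keep (c : Char) (cs : List Char) (ps : List Nat) :
    pvBuild (c :: cs) (ps.map Nat.succ) = c :: pvBuild cs ps := by
  simp only [pvBuild, List.length_cons, List.range_succ_eq_map, List.map_cons, List.map_map]
  refine List.cons_eq_cons.mpr ⟨by simp, ?_⟩
  apply List.map_congr_left
  intro i _
  have : Nat.succ i ∈ ps.map Nat.succ ↔ i ∈ ps := by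
    simp only [List.mem_map]
    constructor
    · rintro ⟨j, hj, he⟩
      have : j = i := Nat.succ_injective he
      exact this ▸ hj
    · intro h; exact ⟨i, h, rfl⟩
  simp [Function.comp, this]

lemma pvBuild_flip (c : Char) (cs : List Char) (ps : List Nat) :
    pvBuild (c :: cs) (0 :: ps.map Nat.succ) = pvInvertA c :: pvBuild cs ps := by
  simp only [pvBuild, List.length_cons, List.range_succ_eq_map, List.map_cons, List.map_map]
  refine List.cons_eq_cons.mpr ⟨by simp, ?_⟩
  apply List.map_congr_left
  intro i _
  have : Nat.succ i ∈ 0 :: ps.map Nat.succ ↔ i ∈ ps := by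
    simp only [List.mem_cons, List.mem_map]
    constructor
    · rintro (h | ⟨j, hj, he⟩)
      · exact absurd h (Nat.succ_ne_zero i)
      · have : j = i := Nat.succ_injective he
        exact this ▸ hj
    · intro h; exact Or.inr ⟨i, h, rfl⟩
  simp [Function.comp, this]

-- the core bridge: A's combinations+rebuild equals B's recursive enumeration
lemma pvMain (l : List Char) (k : Int) (hk : 0 ≤ k) :
    (pvCombos (List.range l.length) k.toNat).map (pvBuild l) = pvGo l k := by
  induction l generalizing k with
  | nil =>
    rw [pvGo]
    rcases eq_or_lt_of_le hk with h | h
    · subst h; simp [pvCombos, pvBuild_nil]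
    · have hkt : k.toNat = k.toNat - 1 + 1 := by omega
      rw [hkt]
      simp only [List.length_nil, List.range_zero, pvCombos, List.map_nil]
      rw [if_pos (by simp; omega)]
  | cons c cs ih =>
    rw [pvGo]
    by_cases hbig : ((c :: cs).length : Int) < k
    · rw [if_pos (Or.inr hbig)]
      rw [pvCombos_eq_nil _ _ (by simp at hbig ⊢; omega)]
      rfl
    · rw [if_neg (by omega)]
      have hrange : List.range (c :: cs).length = 0 :: (List.range cs.length).map Nat.succ :=
        List.range_succ_eq_map
      rcases eq_or_lt_of_le hk with h0 | h0
      · -- k = 0: only the keep branch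
        subst h0
        have hcs : pvGo cs 0 = [cs] := by
          rw [← ih 0 le_rfl]
          simp [pvCombos, pvBuild_nil]
        simp [pvCombos, pvBuild_nil, hcs]
      · have hkt : k.toNat = (k - 1).toNat + 1 := by omega
        rw [hrange, hkt]
        simp only [pvCombos, List.map_append, List.map_map]
        rw [if_pos h0]
        congr 1
        · rw [pvCombos_map]
          rw [← ih (k - 1) (by omega)]
          simp only [List.map_map]
          apply List.map_congr_left
          intro ps _
          simp [Function.comp, pvBuild_flip, pvInvertA, pvInvertB]
        · rw [← hkt, pvCombos_map, ← ih k hk]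
          simp only [List.map_map]
          apply List.map_congr_left
          intro ps _
          simp [Function.comp, pvBuild_keep]

-- ===== VERDICT (by name: the statement is the Claim_ definition above) =====
theorem compute_hash_with_dist_py_spec : Claim_equal_compute_hash_with_dist_py := by
  intro hashcode dist _ hpre
  unfold Spec_compute_hash_with_dist_py compute_hash_with_dist_py compute_hash_with_dist_py_alt
  rw [if_neg (by exact not_lt.mpr hpre)]
  rw [← pvMain hashcode.toList dist hpre]
  simp [List.map_map, Function.comp]
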